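-- pv_equiv track=rewrite | github.com/SS-JIA/pytorch-jit-paritybench | generated/test_pcyin_pytorch_nmt.py | input_transpose
-- ===== SOURCE A (Python) =====
-- xrange = range
--
-- def input_transpose(sents, pad_token):
--     max_len = max(len(s) for s in sents)
--     batch_size = len(sents)
--     sents_t = []
--     masks = []
--     for i in xrange(max_len):
--         sents_t.append([(sents[k][i] if len(sents[k]) > i else pad_token) for k in xrange(batch_size)])
--         masks.append([(1 if len(sents[k]) > i else 0) for k in xrange(batch_size)])
--     return sents_t, masks
-- ===== SOURCE B (Python) =====
-- def input_transpose(sents, pad_token):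
--     lengths = [len(s) for s in sents]
--     max_len = max(lengths)
--     sents_t = []
--     rest = list(sents)
--     while any(rest):
--         sents_t.append([s[0] if s else pad_token for s in rest])
--         rest = [s[1:] for s in rest]
--     masks = [[1 if l > i else 0 for l in lengths] for i in range(max_len)]
--     return sents_t, masks
-- ===== Notes on version B (the rewrite author's own statement) =====
-- stated objective: alternative
-- what changed: Replaces the index-driven double loop (range(max_len) x range(batch_size) with per-element indexing) by peeling: repeatedly take the heads of all remaining sentences as the next column and step to the tails until all are exhausted, with masks computed once from a precomputed lengths list.
import Mathlib
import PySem

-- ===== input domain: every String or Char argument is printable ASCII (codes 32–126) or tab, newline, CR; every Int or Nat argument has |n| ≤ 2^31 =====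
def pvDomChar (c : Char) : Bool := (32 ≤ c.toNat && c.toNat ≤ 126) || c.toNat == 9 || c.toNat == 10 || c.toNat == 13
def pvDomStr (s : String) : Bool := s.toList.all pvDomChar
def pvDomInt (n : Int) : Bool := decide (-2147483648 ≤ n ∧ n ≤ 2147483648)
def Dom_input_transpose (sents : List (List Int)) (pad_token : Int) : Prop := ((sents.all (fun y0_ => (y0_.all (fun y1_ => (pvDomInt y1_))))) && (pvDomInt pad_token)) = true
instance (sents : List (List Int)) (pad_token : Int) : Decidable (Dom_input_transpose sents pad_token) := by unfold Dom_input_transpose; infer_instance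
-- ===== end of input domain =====

-- B transposes the ragged batch by peeling off heads column by column instead of
-- A's index-driven double loop; masks come from a precomputed lengths list (alternative, not faster).

-- ===== PORT A =====
-- max(len(s) for s in sents); Python raises ValueError on empty sents — excluded by Pre_, the none arm is never reached there
def pvMaxA (sents : List (List Int)) : Int :=
  match PySem.List.max? (sents.map (fun s => (s.length : Int))) (fun x => x) with
  | some m => m
  | none => 0

def input_transpose (sents : List (List Int)) (pad_token : Int) : List (List Int) × List (List Int) :=
  let max_len : Int := pvMaxA sents
  let batch_size : Int := (sents.length : Int)
  (PySem.List.pyRange 0 max_len 1).foldl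
    (fun (st : List (List Int) × List (List Int)) i =>
      (st.1 ++ [(PySem.List.pyRange 0 batch_size 1).map (fun k =>
          if i < ((PySem.List.pyGetD sents k []).length : Int)
          then PySem.List.pyGetD (PySem.List.pyGetD sents k []) i pad_token else pad_token)],
       st.2 ++ [(PySem.List.pyRange 0 batch_size 1).map (fun k =>
          if i < ((PySem.List.pyGetD sents k []).length : Int) then (1 : Int) else 0)]))
    ([], [])

-- ===== PORT B =====
-- termination helpers for pvPeel (cited by name in decreasing_by)
theorem pv_sum_tail_le (t : List (List Int)) :
    (t.map (fun u => u.tail.length)).sum ≤ (t.map List.length).sum := by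
  induction t with
  | nil => simp
  | cons a u ih =>
    have ha : a.tail.length ≤ a.length := by cases a <;> simp
    simp only [List.map_cons, List.sum_cons]
    omega

theorem pv_sum_tail_lt (xss : List (List Int)) (s : List Int) (hs : s ∈ xss) (hne : s ≠ []) :
    (xss.map (fun t => t.tail.length)).sum < (xss.map List.length).sum := by
  induction xss with
  | nil => cases hs
  | cons a t ih =>
    simp only [List.map_cons, List.sum_cons]
    rcases List.mem_cons.mp hs with h | h
    · subst h
      have h1 : s.tail.length < s.length := by
        cases s with | nil => exact absurd rfl hne | cons x xs => simp
      have := pv_sum_tail_le t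
      omega
    · have := ih h
      have ha : a.tail.length ≤ a.length := by cases a <;> simp
      omega

-- the 'while any(rest)' loop: emit the column of heads, step to the tails (s[1:])
def pvPeel (pad_token : Int) (rest : List (List Int)) : List (List Int) :=
  if h : rest.any (fun s => !s.isEmpty) then
    (rest.map (fun s => if s.isEmpty then pad_token else s.headD pad_token))
      :: pvPeel pad_token (rest.map (fun s => PySem.List.slice s (some 1) none))
  else []
termination_by (rest.map List.length).sum
decreasing_by
  simp only [List.any_eq_true, Bool.not_eq_true', List.isEmpty_eq_false_iff] at h
  obtain ⟨s, hs, hne⟩ := h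
  simp only [PySem.List.slice_from_one]
  simp only [List.map_map, Function.comp_def]
  simpa using pv_sum_tail_lt rest s hs hne

def input_transpose_alt (sents : List (List Int)) (pad_token : Int) : List (List Int) × List (List Int) :=
  let lengths : List Int := sents.map (fun s => (s.length : Int))
  let max_len : Int :=
    match PySem.List.max? lengths (fun x => x) with
    | some m => m
    | none => 0
  let sents_t := pvPeel pad_token sents
  let masks := (PySem.List.pyRange 0 max_len 1).map (fun i =>
    lengths.map (fun l => if l > i then (1 : Int) else 0))
  (sents_t, masks)

-- ===== PRECONDITION & SPEC =====
-- Pre_ excludes only sents = [], where both A and B raise ValueError (max() of an empty sequence)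
def Pre_input_transpose (sents : List (List Int)) (pad_token : Int) : Prop := sents ≠ []
instance (sents : List (List Int)) (pad_token : Int) : Decidable (Pre_input_transpose sents pad_token) := by unfold Pre_input_transpose; infer_instance

def pvWitness_input_transpose : List (List Int) × Int := ([[1, 2], [3]], 0)

def Spec_input_transpose (sents : List (List Int)) (pad_token : Int) (out : List (List Int) × List (List Int)) : Prop := out = input_transpose_alt sents pad_token
instance (sents : List (List Int)) (pad_token : Int) (out : List (List Int) × List (List Int)) : Decidable (Spec_input_transpose sents pad_token out) := by unfold Spec_input_transpose; infer_instance

-- ===== CLAIM (what is proved, stated in full; the proofs are below) =====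
def Claim_equal_input_transpose : Prop := ∀ (sents : List (List Int)) (pad_token : Int), Dom_input_transpose sents pad_token → Pre_input_transpose sents pad_token → Spec_input_transpose sents pad_token (input_transpose sents pad_token)

-- ===== LEMMAS AND PROOFS =====

-- the natural-number column at depth n
def pvColNat (sents : List (List Int)) (pad_token : Int) (n : Nat) : List Int :=
  sents.map (fun s => if n < s.length then s.getD n pad_token else pad_token)

def pvMaxN (xss : List (List Int)) : Nat := (xss.map List.length).foldl max 0

theorem pv_foldl_pair_append (f g : Int → List Int) (l : List Int)
    (a b : List (List Int)) :
    l.foldl (fun (st : List (List Int) × List (List Int)) i => (st.1 ++ [f i], st.2 ++ [g i])) (a, b)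
      = (a ++ l.map f, b ++ l.map g) := by
  induction l generalizing a b with
  | nil => simp
  | cons x t ih => simp [ih]

theorem pv_foldl_max_pred (ls : List Nat) (a : Nat) :
    (ls.map (· - 1)).foldl max (a - 1) = (ls.foldl max a) - 1 := by
  induction ls generalizing a with
  | nil => rfl
  | cons l t ih =>
    simp only [List.map_cons, List.foldl_cons]
    rw [show max (a - 1) (l - 1) = max a l - 1 by omega]
    exact ih (max a l)

theorem pv_maxN_tails (xss : List (List Int)) :
    pvMaxN (xss.map (fun s => s.tail)) = pvMaxN xss - 1 := by
  unfold pvMaxN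
  have h : (xss.map (fun s => s.tail)).map List.length = (xss.map List.length).map (· - 1) := by
    simp [List.map_map]
  rw [h]
  simpa using pv_foldl_max_pred (xss.map List.length) 0

theorem pv_mem_le_foldl_max (ls : List Nat) (a : Nat) :
    a ≤ ls.foldl max a ∧ ∀ x ∈ ls, x ≤ ls.foldl max a := by
  induction ls generalizing a with
  | nil => simp
  | cons l t ih =>
    have h := ih (max a l)
    refine ⟨le_trans (le_max_left a l) h.1, ?_⟩
    intro x hx
    rcases List.mem_cons.mp hx with h' | h'
    · subst h'; exact le_trans (le_max_right a x) h.1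
    · exact h.2 x h'

theorem pv_maxN_zero_all_empty (xss : List (List Int)) (h : pvMaxN xss = 0) :
    ∀ s ∈ xss, s = [] := by
  intro s hs
  have hle := (pv_mem_le_foldl_max (xss.map List.length) 0).2 s.length (List.mem_map_of_mem hs)
  unfold pvMaxN at h
  exact List.eq_nil_of_length_eq_zero (by omega)

theorem pv_all_empty_maxN (xss : List (List Int)) (h : ∀ s ∈ xss, s = []) :
    pvMaxN xss = 0 := by
  unfold pvMaxN
  induction xss with
  | nil => rfl
  | cons a t ih =>
    have ha : a = [] := h a (List.mem_cons_self)
    subst ha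
    simpa using ih (fun s hs => h s (List.mem_cons_of_mem _ hs))

-- pvPeel computes the range-indexed columns
theorem pv_peel_eq (pad : Int) (N : Nat) :
    ∀ xss : List (List Int), pvMaxN xss = N →
      pvPeel pad xss = (List.range N).map (fun n => pvColNat xss pad n) := by
  induction N with
  | zero =>
    intro xss h
    have hall := pv_maxN_zero_all_empty xss h
    rw [pvPeel.eq_def, dif_neg, List.range_zero, List.map_nil]
    simp only [List.any_eq_true, Bool.not_eq_true', List.isEmpty_eq_false_iff, not_exists]
    intro s hs
    exact hs.2 (hall s hs.1)
  | succ N ih =>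
    intro xss h
    have hne : xss.any (fun s => !s.isEmpty) = true := by
      by_contra hc
      simp only [Bool.not_eq_true, List.any_eq_false, Bool.not_eq_true',
        Bool.not_eq_false, List.isEmpty_iff] at hc
      have := pv_all_empty_maxN xss hc
      omega
    rw [pvPeel.eq_def, dif_pos hne]
    have htails : (xss.map (fun s => PySem.List.slice s (some 1) none)) = xss.map (fun s => s.tail) := by
      simp [PySem.List.slice_from_one]
    rw [htails, ih _ (by rw [pv_maxN_tails, h]; omega)]
    rw [List.range_succ_eq_map]
    simp only [List.map_cons, List.map_map]
    congr 1
    · unfold pvColNat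
      apply List.map_congr_left
      intro s _
      cases s <;> simp
    · apply List.map_congr_left
      intro n _
      unfold pvColNat
      simp only [Function.comp, List.map_map]
      apply List.map_congr_left
      intro s _
      cases s <;> simp

-- casting the running max of lengths from Int back to Nat
theorem pv_foldl_max_cast (ss : List (List Int)) (a : Nat) :
    (ss.map (fun t => (t.length : Int))).foldl max (a : Int)
      = (((ss.map List.length).foldl max a : Nat) : Int) := by
  induction ss generalizing a with
  | nil => rfl
  | cons s t ih =>
    simp only [List.map_cons, List.foldl_cons]
    rw [show (max (a : Int) (s.length : Int)) = ((max a s.length : Nat) : Int) by push_cast; rfl]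
    exact ih (max a s.length)

theorem pv_maxA_eq (s : List Int) (ss : List (List Int)) :
    pvMaxA (s :: ss) = (pvMaxN (s :: ss) : Int) := by
  unfold pvMaxA pvMaxN
  simp only [List.map_cons]
  rw [PySem.List.max?_id_cons]
  simp only [List.foldl_cons]
  have h0 : (max 0 s.length : Nat) = s.length := by omega
  calc (ss.map (fun t => (t.length : Int))).foldl max (s.length : Int)
      = (((ss.map List.length).foldl max s.length : Nat) : Int) := pv_foldl_max_cast ss s.length
    _ = (((ss.map List.length).foldl max (max 0 s.length) : Nat) : Int) := by rw [h0]

-- A's column at an Int index ↑n equals the Nat column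
theorem pv_colA_eq (sents : List (List Int)) (pad : Int) (n : Nat) :
    (PySem.List.pyRange 0 (sents.length : Int) 1).map (fun k =>
        if (n : Int) < ((PySem.List.pyGetD sents k []).length : Int)
        then PySem.List.pyGetD (PySem.List.pyGetD sents k []) (n : Int) pad else pad)
      = pvColNat sents pad n := by
  have h1 : (PySem.List.pyRange 0 (sents.length : Int) 1).map (fun k =>
        if (n : Int) < ((PySem.List.pyGetD sents k []).length : Int)
        then PySem.List.pyGetD (PySem.List.pyGetD sents k []) (n : Int) pad else pad)
      = ((PySem.List.pyRange 0 (sents.length : Int) 1).map (fun k => PySem.List.pyGetD sents k [])).map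
          (fun s => if (n : Int) < (s.length : Int) then PySem.List.pyGetD s (n : Int) pad else pad) := by
    rw [List.map_map]; rfl
  rw [h1, PySem.List.map_pyGetD_pyRange_zero']
  unfold pvColNat
  apply List.map_congr_left
  intro s _
  simp [PySem.List.pyGetD_natCast, Nat.cast_lt]

theorem pv_maskA_eq (sents : List (List Int)) (i : Int) :
    (PySem.List.pyRange 0 (sents.length : Int) 1).map (fun k =>
        if i < ((PySem.List.pyGetD sents k []).length : Int) then (1 : Int) else 0)
      = (sents.map (fun s => (s.length : Int))).map (fun l => if l > i then (1 : Int) else 0) := by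
  have h1 : (PySem.List.pyRange 0 (sents.length : Int) 1).map (fun k =>
        if i < ((PySem.List.pyGetD sents k []).length : Int) then (1 : Int) else 0)
      = ((PySem.List.pyRange 0 (sents.length : Int) 1).map (fun k => PySem.List.pyGetD sents k [])).map
          (fun s => if i < (s.length : Int) then (1 : Int) else 0) := by
    rw [List.map_map]; rfl
  rw [h1, PySem.List.map_pyGetD_pyRange_zero', List.map_map]
  rfl

-- ===== VERDICT (by name: the statement is the Claim_ definition above) =====
theorem input_transpose_spec : Claim_equal_input_transpose := by
  intro sents pad_token _ hpre
  unfold Spec_input_transpose input_transpose input_transpose_alt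
  obtain ⟨s, ss, rfl⟩ : ∃ s ss, sents = s :: ss := by
    cases sents with
    | nil => exact absurd rfl hpre
    | cons s ss => exact ⟨s, ss, rfl⟩
  have hmax : (match PySem.List.max? (((s :: ss)).map (fun t => (t.length : Int))) (fun x => x) with
      | some m => m
      | none => 0) = pvMaxA (s :: ss) := rfl
  rw [pv_foldl_pair_append]
  simp only [List.nil_append, hmax]
  have hM : pvMaxA (s :: ss) = (pvMaxN (s :: ss) : Int) := pv_maxA_eq s ss
  rw [Prod.mk.injEq]
  constructor
  · rw [hM, pv_peel_eq pad_token (pvMaxN (s :: ss)) (s :: ss) rfl]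
    have step1 : (PySem.List.pyRange 0 ((pvMaxN (s :: ss) : Nat) : Int) 1).map (fun i =>
          (PySem.List.pyRange 0 (((s :: ss).length : Nat) : Int) 1).map (fun k =>
            if i < ((PySem.List.pyGetD (s :: ss) k []).length : Int)
            then PySem.List.pyGetD (PySem.List.pyGetD (s :: ss) k []) i pad_token else pad_token))
        = (PySem.List.pyRange 0 ((pvMaxN (s :: ss) : Nat) : Int) 1).map (fun i =>
            pvColNat (s :: ss) pad_token i.toNat) := by
      apply List.map_congr_left
      intro i hi
      have h0 : 0 ≤ i := (PySem.List.mem_pyRange_one.mp hi).1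
      obtain ⟨n, rfl⟩ : ∃ n : Nat, i = (n : Int) := ⟨i.toNat, by omega⟩
      rw [Int.toNat_natCast]
      exact pv_colA_eq (s :: ss) pad_token n
    rw [step1, PySem.List.pyRange_zero_natCast, List.map_map]
    apply List.map_congr_left
    intro n _
    simp
  · apply List.map_congr_left
    intro i _
    exact pv_maskA_eq (s :: ss) i
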